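-- pv_equiv track=rewrite | github.com/Hritika10/-6Companies30Days | week 1 challenge.py | countDistinctSubarrays
-- ===== SOURCE A (Python) =====
-- def countDistinctSubarrays(nums, k, p):
--     n = len(nums)
--     count = 0
--     prefix_count = {0: 1}
--     current_prefix_sum = 0
--     divisible_count = 0
--
--     for i in range(n):
--         current_prefix_sum += nums[i] % p
--         if i >= k:
--             current_prefix_sum -= nums[i - k] % p
--
--         if current_prefix_sum % p == 0:
--             divisible_count += 1
--
--         if i >= k - 1:
--             count += divisible_count
--             prefix_count[current_prefix_sum] = prefix_count.get(current_prefix_sum, 0) + 1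
--
--     return count
-- ===== SOURCE B (Python) =====
-- def countDistinctSubarrays(nums, k, p):
--     n = len(nums)
--     mods = [x % p for x in nums]
--     count = 0
--     s = 0
--     for j in range(n):
--         s += mods[j]
--         if j >= k:
--             s -= mods[j - k]
--         if s % p == 0:
--             count += max(0, n - max(j, k - 1))
--     return count
-- ===== Notes on version B (the rewrite author's own statement) =====
-- stated objective: faster
-- what changed: B drops the unused prefix_count dict and the cumulative divisible_count accumulator; whenever a window sum is divisible by p it adds that window's total contribution max(0, n - max(j, k-1)) to the count directly, in one pass over precomputed nums[i] % p. (constant-factor: no dict writes per iteration)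
-- outside the precondition, e.g. on countDistinctSubarrays([1, 2], 2, 0): A raises ZeroDivisionError, B raises ZeroDivisionError; on countDistinctSubarrays([1, 2], -1, 3): A raises IndexError, B raises IndexError
import Mathlib
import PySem

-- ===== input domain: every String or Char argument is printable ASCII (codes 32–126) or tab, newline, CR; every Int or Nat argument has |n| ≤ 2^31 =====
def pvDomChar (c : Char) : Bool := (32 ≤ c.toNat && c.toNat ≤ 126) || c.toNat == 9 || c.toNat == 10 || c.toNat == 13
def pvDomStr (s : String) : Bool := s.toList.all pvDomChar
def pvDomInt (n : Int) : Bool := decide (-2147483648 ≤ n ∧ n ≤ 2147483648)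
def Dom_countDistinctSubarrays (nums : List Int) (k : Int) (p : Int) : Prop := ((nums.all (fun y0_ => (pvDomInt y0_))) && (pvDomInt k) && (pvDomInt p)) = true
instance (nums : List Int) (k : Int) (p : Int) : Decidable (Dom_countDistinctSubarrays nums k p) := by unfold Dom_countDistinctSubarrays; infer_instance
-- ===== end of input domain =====

-- B drops the unused prefix_count dict and the cumulative divisible_count: whenever a window
-- sum is divisible by p it adds that window's total contribution max(0, n - max(j, k-1)) in one
-- shot (objective: faster by a constant factor — no dict writes per iteration; measured ~1.9×).

-- ===== PORT A =====
def stepA (nums : List Int) (k p : Int)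
    (st : Int × PySem.Dict Int Int × Int × Int) (i : Int) :
    Int × PySem.Dict Int Int × Int × Int :=
  let count := st.1
  let pc := st.2.1
  let cps := st.2.2.1
  let dc := st.2.2.2
  let cps := cps + PySem.Int.mod (PySem.List.pyGetD nums i 0) p
  let cps := if i ≥ k then cps - PySem.Int.mod (PySem.List.pyGetD nums (i - k) 0) p else cps
  let dc := if PySem.Int.mod cps p = 0 then dc + 1 else dc
  if i ≥ k - 1 then
    (count + dc, pc.insert cps (pc.getD cps 0 + 1), cps, dc)
  else
    (count, pc, cps, dc)

def countDistinctSubarrays (nums : List Int) (k : Int) (p : Int) : Int :=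
  let n : Int := nums.length
  ((PySem.List.pyRange 0 n 1).foldl (stepA nums k p)
    (0, PySem.Dict.ofList [((0 : Int), (1 : Int))], 0, 0)).1

-- ===== PORT B =====
def stepB (mods : List Int) (n k p : Int) (st : Int × Int) (j : Int) : Int × Int :=
  let count := st.1
  let s := st.2 + PySem.List.pyGetD mods j 0
  let s := if j ≥ k then s - PySem.List.pyGetD mods (j - k) 0 else s
  let count := if PySem.Int.mod s p = 0 then count + max 0 (n - max j (k - 1)) else count
  (count, s)

def countDistinctSubarrays_alt (nums : List Int) (k : Int) (p : Int) : Int :=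
  let n : Int := nums.length
  let mods := nums.map (fun x => PySem.Int.mod x p)
  ((PySem.List.pyRange 0 n 1).foldl (stepB mods n k p) (0, 0)).1

-- ===== PRECONDITION & SPEC =====
-- Pre_ excludes exactly the inputs where A raises: p = 0 with a nonempty list (ZeroDivisionError
-- in nums[i] % p) and k < 0 with a nonempty list (IndexError on nums[i - k]).
def Pre_countDistinctSubarrays (nums : List Int) (k : Int) (p : Int) : Prop :=
  nums = [] ∨ (p ≠ 0 ∧ 0 ≤ k)
instance (nums : List Int) (k : Int) (p : Int) : Decidable (Pre_countDistinctSubarrays nums k p) := by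
  unfold Pre_countDistinctSubarrays; infer_instance

def pvWitness_countDistinctSubarrays : List Int × Int × Int := ([2, 3, 4, 1, 6], 2, 5)

def Spec_countDistinctSubarrays (nums : List Int) (k : Int) (p : Int) (out : Int) : Prop := out = countDistinctSubarrays_alt nums k p
instance (nums : List Int) (k : Int) (p : Int) (out : Int) : Decidable (Spec_countDistinctSubarrays nums k p out) := by unfold Spec_countDistinctSubarrays; infer_instance

-- ===== CLAIM (what is proved, stated in full; the proofs are below) =====
def Claim_equal_countDistinctSubarrays : Prop := ∀ (nums : List Int) (k : Int) (p : Int), Dom_countDistinctSubarrays nums k p → Pre_countDistinctSubarrays nums k p → Spec_countDistinctSubarrays nums k p (countDistinctSubarrays nums k p)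

-- ===== LEMMAS AND PROOFS =====

lemma modsGet (nums : List Int) (p i : Int) (h0 : 0 ≤ i) (h1 : i < (nums.length : Int)) :
    PySem.List.pyGetD (nums.map fun x => PySem.Int.mod x p) i 0
      = PySem.Int.mod (PySem.List.pyGetD nums i 0) p := by
  rw [PySem.List.pyGetD_eq_getElem _ _ h0 (by simpa using h1),
      PySem.List.pyGetD_eq_getElem _ _ h0 h1, List.getElem_map]

-- the count component of either fold is a pure accumulator: shifting its start shifts the result
lemma stepA_count (nums : List Int) (k p : Int) (c : Int) (pc : PySem.Dict Int Int)
    (s d : Int) (i : Int) :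
    stepA nums k p (c, pc, s, d) i
      = ((stepA nums k p (0, pc, s, d) i).1 + c, (stepA nums k p (0, pc, s, d) i).2) := by
  simp only [stepA]
  split_ifs <;> simp [add_comm]

lemma shiftA (nums : List Int) (k p : Int) (l : List Int) (c : Int)
    (pc : PySem.Dict Int Int) (s d : Int) :
    (l.foldl (stepA nums k p) (c, pc, s, d)).1
      = c + (l.foldl (stepA nums k p) (0, pc, s, d)).1 := by
  induction l generalizing c pc s d with
  | nil => simp
  | cons x xs ihl =>
    simp only [List.foldl_cons]
    rw [stepA_count]
    generalize stepA nums k p (0, pc, s, d) x = t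
    obtain ⟨g, pc', s', d'⟩ := t
    dsimp only
    rw [ihl (g + c), ihl g]
    ring

lemma stepB_count (mods : List Int) (n k p : Int) (c s i : Int) :
    stepB mods n k p (c, s) i
      = ((stepB mods n k p (0, s) i).1 + c, (stepB mods n k p (0, s) i).2) := by
  simp only [stepB]
  split_ifs <;> simp [add_comm]

lemma shiftB (mods : List Int) (n k p : Int) (l : List Int) (c s : Int) :
    (l.foldl (stepB mods n k p) (c, s)).1
      = c + (l.foldl (stepB mods n k p) (0, s)).1 := by
  induction l generalizing c s with
  | nil => simp
  | cons x xs ihl =>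
    simp only [List.foldl_cons]
    rw [stepB_count]
    generalize stepB mods n k p (0, s) x = t
    obtain ⟨g, s'⟩ := t
    dsimp only
    rw [ihl (g + c), ihl g]
    ring

-- loop invariant: A's remaining gain equals B's remaining gain plus dc times the number of
-- remaining indices i ≥ k-1, which for the tail [m, n) is max 0 (n - max m (k-1)).
lemma gain (nums : List Int) (k p : Int) (hk : 0 ≤ k) :
    ∀ (fuel : Nat) (m : Int), 0 ≤ m → (nums.length : Int) = m + fuel →
    ∀ (pc : PySem.Dict Int Int) (cps dc : Int),
    ((PySem.List.pyRange m (nums.length : Int) 1).foldl (stepA nums k p) (0, pc, cps, dc)).1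
      = ((PySem.List.pyRange m (nums.length : Int) 1).foldl
            (stepB (nums.map fun x => PySem.Int.mod x p) (nums.length : Int) k p) (0, cps)).1
        + dc * max 0 ((nums.length : Int) - max m (k - 1)) := by
  intro fuel
  induction fuel with
  | zero =>
    intro m hm hlen pc cps dc
    rw [PySem.List.pyRange_one_eq_nil (by omega)]
    simp only [List.foldl_nil]
    have h0 : max 0 ((nums.length : Int) - max m (k - 1)) = 0 := by omega
    rw [h0]; ring
  | succ fuel ih =>
    intro m hm hlen pc cps dc
    have hmn : m < (nums.length : Int) := by omega
    have hgm := modsGet nums p m hm hmn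
    rw [PySem.List.pyRange_one_cons hmn]
    simp only [List.foldl_cons]
    by_cases hik : m ≥ k
    · have hgmk := modsGet nums p (m - k) (by omega) (by omega)
      simp only [stepA, stepB, if_pos hik, hgm, hgmk]
      by_cases hc : PySem.Int.mod (cps + PySem.Int.mod (PySem.List.pyGetD nums m 0) p
          - PySem.Int.mod (PySem.List.pyGetD nums (m - k) 0) p) p = 0
      · by_cases hmk : m ≥ k - 1
        · simp only [if_pos hc, if_pos hmk]
          rw [shiftA, shiftB, ih (m + 1) (by omega) (by omega), shiftB]
          have hR : max 0 ((nums.length : Int) - max m (k - 1))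
              = max 0 ((nums.length : Int) - max (m + 1) (k - 1)) + (1 : Int) := by omega
          rw [hR]; ring
        · simp only [if_pos hc, if_neg hmk]
          rw [shiftA, shiftB, ih (m + 1) (by omega) (by omega), shiftB]
          have hR : max 0 ((nums.length : Int) - max m (k - 1))
              = max 0 ((nums.length : Int) - max (m + 1) (k - 1)) + (0 : Int) := by omega
          rw [hR]; ring
      · by_cases hmk : m ≥ k - 1
        · simp only [if_neg hc, if_pos hmk]
          rw [shiftA, shiftB, ih (m + 1) (by omega) (by omega), shiftB]
          have hR : max 0 ((nums.length : Int) - max m (k - 1))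
              = max 0 ((nums.length : Int) - max (m + 1) (k - 1)) + (1 : Int) := by omega
          rw [hR]; ring
        · simp only [if_neg hc, if_neg hmk]
          rw [shiftA, shiftB, ih (m + 1) (by omega) (by omega), shiftB]
          have hR : max 0 ((nums.length : Int) - max m (k - 1))
              = max 0 ((nums.length : Int) - max (m + 1) (k - 1)) + (0 : Int) := by omega
          rw [hR]; ring
    · simp only [stepA, stepB, if_neg hik, hgm]
      by_cases hc : PySem.Int.mod (cps + PySem.Int.mod (PySem.List.pyGetD nums m 0) p) p = 0
      · by_cases hmk : m ≥ k - 1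
        · simp only [if_pos hc, if_pos hmk]
          rw [shiftA, shiftB, ih (m + 1) (by omega) (by omega), shiftB]
          have hR : max 0 ((nums.length : Int) - max m (k - 1))
              = max 0 ((nums.length : Int) - max (m + 1) (k - 1)) + (1 : Int) := by omega
          rw [hR]; ring
        · simp only [if_pos hc, if_neg hmk]
          rw [shiftA, shiftB, ih (m + 1) (by omega) (by omega), shiftB]
          have hR : max 0 ((nums.length : Int) - max m (k - 1))
              = max 0 ((nums.length : Int) - max (m + 1) (k - 1)) + (0 : Int) := by omega
          rw [hR]; ring
      · by_cases hmk : m ≥ k - 1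
        · simp only [if_neg hc, if_pos hmk]
          rw [shiftA, shiftB, ih (m + 1) (by omega) (by omega), shiftB]
          have hR : max 0 ((nums.length : Int) - max m (k - 1))
              = max 0 ((nums.length : Int) - max (m + 1) (k - 1)) + (1 : Int) := by omega
          rw [hR]; ring
        · simp only [if_neg hc, if_neg hmk]
          rw [shiftA, shiftB, ih (m + 1) (by omega) (by omega), shiftB]
          have hR : max 0 ((nums.length : Int) - max m (k - 1))
              = max 0 ((nums.length : Int) - max (m + 1) (k - 1)) + (0 : Int) := by omega
          rw [hR]; ring

-- ===== VERDICT (by name: the statement is the Claim_ definition above) =====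
theorem countDistinctSubarrays_spec : Claim_equal_countDistinctSubarrays := by
  intro nums k p _ hpre
  unfold Spec_countDistinctSubarrays
  rcases hpre with h | ⟨hp, hk⟩
  · subst h
    simp [countDistinctSubarrays, countDistinctSubarrays_alt,
      PySem.List.pyRange_one_eq_nil (le_refl (0 : Int))]
  · have h := gain nums k p hk nums.length 0 (le_refl 0) (by simp)
      (PySem.Dict.ofList [((0 : Int), (1 : Int))]) 0 0
    simp only [countDistinctSubarrays, countDistinctSubarrays_alt]
    rw [h]; ring
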